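-- pv_equiv track=rewrite | github.com/FyodorovAleksej/COSI2 | engine.py | toLines
-- ===== SOURCE A (Python) =====
-- def toLines(__points: list):
--     heights = [i[0] for i in __points]
--     minHeight = min(heights)
--     maxHeight = max(heights)
--     width = [i[1] for i in __points]
--     minWidth = min(width)
--     if minHeight == maxHeight:
--         return []
--     lines = [[] for _ in range(minHeight, maxHeight + 1)]
--     for point in __points:
--         lines[point[0] - minHeight].append(point[1] - minWidth)
--     return lines
-- ===== SOURCE B (Python) =====
-- def toLines(__points: list):
--     heights = [i[0] for i in __points]
--     minHeight = min(heights)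
--     maxHeight = max(heights)
--     minWidth = min(i[1] for i in __points)
--     if minHeight == maxHeight:
--         return []
--     return [[p[1] - minWidth for p in __points if p[0] == h]
--             for h in range(minHeight, maxHeight + 1)]
-- ===== Notes on version B (the rewrite author's own statement) =====
-- stated objective: simpler
-- what changed: A preallocates a row list and scatters each point into it by computed index; B never materialises mutable rows: for each height of the range it filters the point list, collecting the width offsets of that height in one comprehension (a per-row scan, O(n*H) instead of O(n+H), traded for brevity).
import Mathlib
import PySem

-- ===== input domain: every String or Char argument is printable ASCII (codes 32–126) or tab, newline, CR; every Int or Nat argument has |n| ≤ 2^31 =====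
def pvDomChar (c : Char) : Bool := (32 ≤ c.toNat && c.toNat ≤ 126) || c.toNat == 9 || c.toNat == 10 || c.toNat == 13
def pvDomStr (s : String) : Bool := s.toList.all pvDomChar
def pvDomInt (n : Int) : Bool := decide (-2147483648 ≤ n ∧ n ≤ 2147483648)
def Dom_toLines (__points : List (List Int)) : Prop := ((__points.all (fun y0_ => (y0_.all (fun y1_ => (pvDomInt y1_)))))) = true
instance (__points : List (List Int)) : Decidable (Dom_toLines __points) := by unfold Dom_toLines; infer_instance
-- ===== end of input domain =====

-- B drops A's preallocated row list and index scatter: it builds each row by filtering the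
-- point list for that height in a comprehension; only the return values are compared.

-- ===== PORT A =====
def toLines (__points : List (List Int)) : List (List Int) :=
  match PySem.List.min? (__points.map (fun i => PySem.List.pyGetD i 0 0)) (fun x => x),
        PySem.List.max? (__points.map (fun i => PySem.List.pyGetD i 0 0)) (fun x => x),
        PySem.List.min? (__points.map (fun i => PySem.List.pyGetD i 1 0)) (fun x => x) with
  | some minHeight, some maxHeight, some minWidth =>
    if minHeight = maxHeight then []
    else
      __points.foldl
        (fun lines point =>
          PySem.List.pySetD lines (PySem.List.pyGetD point 0 0 - minHeight)
            (PySem.List.pyGetD lines (PySem.List.pyGetD point 0 0 - minHeight) []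
              ++ [PySem.List.pyGetD point 1 0 - minWidth]))
        ((PySem.List.pyRange minHeight (maxHeight + 1) 1).map (fun _ => []))
  | _, _, _ => []

-- ===== PORT B =====
def toLines_alt (__points : List (List Int)) : List (List Int) :=
  match PySem.List.min? (__points.map (fun i => PySem.List.pyGetD i 0 0)) (fun x => x) with
  | none => []
  | some minHeight =>
    match PySem.List.max? (__points.map (fun i => PySem.List.pyGetD i 0 0)) (fun x => x) with
    | none => []
    | some maxHeight =>
      match PySem.List.min? (__points.map (fun i => PySem.List.pyGetD i 1 0)) (fun x => x) with
      | none => []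
      | some minWidth =>
        if minHeight = maxHeight then []
        else
          (PySem.List.pyRange minHeight (maxHeight + 1) 1).map (fun h =>
            (__points.filter (fun p => PySem.List.pyGetD p 0 0 == h)).map
              (fun p => PySem.List.pyGetD p 1 0 - minWidth))

-- ===== PRECONDITION & SPEC =====
-- Pre_ excludes exactly the inputs on which the Python A raises: the empty list
-- (min() of an empty sequence, ValueError) and inner lists of length < 2 (IndexError).
def Pre_toLines (__points : List (List Int)) : Prop :=
  __points ≠ [] ∧ ∀ p ∈ __points, 2 ≤ p.length
instance (__points : List (List Int)) : Decidable (Pre_toLines __points) := by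
  unfold Pre_toLines; infer_instance
def pvWitness_toLines : List (List Int) := [[0, 0], [1, 2]]
def Spec_toLines (__points : List (List Int)) (out : List (List Int)) : Prop := out = toLines_alt __points
instance (__points : List (List Int)) (out : List (List Int)) : Decidable (Spec_toLines __points out) := by unfold Spec_toLines; infer_instance

-- ===== CLAIM (what is proved, stated in full; the proofs are below) =====
def Claim_equal_toLines : Prop := ∀ (__points : List (List Int)), Dom_toLines __points → Pre_toLines __points → Spec_toLines __points (toLines __points)

-- ===== LEMMAS AND PROOFS =====

-- the height of a point and its offset value, as the ports compute them
def pvK (p : List Int) : Int := PySem.List.pyGetD p 0 0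
def pvV (minW : Int) (p : List Int) : Int := PySem.List.pyGetD p 1 0 - minW

-- A side: each cell of the scattered list is its start value plus the in-order offsets at its height
lemma scatter_getElem? (minH minW : Int) (ps : List (List Int)) (ls : List (List Int))
    (hb : ∀ p ∈ ps, 0 ≤ pvK p - minH ∧ pvK p - minH < ls.length) (j : Nat) :
    (ps.foldl (fun lines p =>
        PySem.List.pySetD lines (pvK p - minH)
          (PySem.List.pyGetD lines (pvK p - minH) [] ++ [pvV minW p])) ls)[j]?
      = (ls[j]?).map (· ++ ((ps.filter (fun p => pvK p == minH + (j : Int))).map (pvV minW))) := by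
  induction ps generalizing ls with
  | nil => cases h : ls[j]? <;> simp [h]
  | cons p rest ih =>
    obtain ⟨h0, h1⟩ := hb p (List.mem_cons_self ..)
    have hlt : (pvK p - minH).toNat < ls.length := by omega
    rw [List.foldl_cons,
      PySem.List.pySetD_of_nonneg _ _ h0,
      PySem.List.pyGetD_eq_getElem _ _ h0 (by exact_mod_cast h1)]
    rw [ih (ls.set (pvK p - minH).toNat (ls[(pvK p - minH).toNat] ++ [pvV minW p]))
      (by intro q hq; simpa using hb q (List.mem_cons_of_mem _ hq))]
    by_cases hc : pvK p = minH + (j : Int)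
    · have hj : (pvK p - minH).toNat = j := by omega
      have hjlt : j < ls.length := by omega
      simp [hc, List.getElem?_set_self hjlt, List.getElem?_eq_getElem hjlt]
    · have hj : (pvK p - minH).toNat ≠ j := by
        intro h; apply hc; omega
      simp [hc, List.getElem?_set_ne hj]

-- ===== VERDICT (by name: the statement is the Claim_ definition above) =====
theorem toLines_spec : Claim_equal_toLines := by
  intro ps _ hpre
  unfold Spec_toLines toLines toLines_alt
  rcases hmin : PySem.List.min? (ps.map (fun i => PySem.List.pyGetD i 0 0)) (fun x => x) with _ | minH
  · rfl
  rcases hmax : PySem.List.max? (ps.map (fun i => PySem.List.pyGetD i 0 0)) (fun x => x) with _ | maxH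
  · rfl
  rcases hminw : PySem.List.min? (ps.map (fun i => PySem.List.pyGetD i 1 0)) (fun x => x) with _ | minW
  · rfl
  dsimp only
  by_cases heq : minH = maxH
  · simp [heq]
  simp only [heq, if_false]
  -- bounds on the heights
  have hlo := PySem.List.min?_isMin hmin
  have hhi := PySem.List.max?_isMax hmax
  have hbound : ∀ p ∈ ps, minH ≤ pvK p ∧ pvK p ≤ maxH := by
    intro p hp
    have : pvK p ∈ ps.map (fun i => PySem.List.pyGetD i 0 0) :=
      List.mem_map.2 ⟨p, hp, rfl⟩
    exact ⟨hlo _ this, hhi _ this⟩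
  have hlen0 : ((PySem.List.pyRange minH (maxH + 1) 1).map
      (fun _ => ([] : List Int))).length = (maxH + 1 - minH).toNat := by
    simp [PySem.List.length_pyRange_one]
  apply List.ext_getElem?
  intro j
  have hA := scatter_getElem? minH minW ps
    ((PySem.List.pyRange minH (maxH + 1) 1).map (fun _ => ([] : List Int)))
    (by intro p hp
        obtain ⟨l, h⟩ := hbound p hp
        rw [hlen0]
        unfold pvK at *
        constructor
        · omega
        · omega) j
  unfold pvK pvV at hA
  rw [hA]
  by_cases hj : j < (maxH + 1 - minH).toNat
  · have hAj : ((PySem.List.pyRange minH (maxH + 1) 1).map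
        (fun _ => ([] : List Int)))[j]? = some [] := by
      rw [List.getElem?_eq_getElem (by rw [hlen0]; exact hj)]
      simp
    have hBj : ((PySem.List.pyRange minH (maxH + 1) 1))[j]? = some (minH + j) := by
      rw [List.getElem?_eq_getElem (by simpa [PySem.List.length_pyRange_one] using hj)]
      rw [PySem.List.getElem_pyRange_one]
    rw [hAj, List.getElem?_map, hBj]
    simp
  · have hAj : ((PySem.List.pyRange minH (maxH + 1) 1).map
        (fun _ => ([] : List Int)))[j]? = none := by
      rw [List.getElem?_eq_none_iff]; omega
    have hBj : ((PySem.List.pyRange minH (maxH + 1) 1).map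
        (fun h => ((ps.filter (fun p => PySem.List.pyGetD p 0 0 == h)).map
          (fun p => PySem.List.pyGetD p 1 0 - minW))))[j]? = none := by
      rw [List.getElem?_eq_none_iff]
      simp only [List.length_map, PySem.List.length_pyRange_one]; omega
    rw [hAj, hBj]; rfl
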